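-- pv_equiv track=rewrite | github.com/SeanGT01/eflora-system | app/utils/report_service.py | _normalise_admin_types
-- ===== SOURCE A (Python) =====
-- from typing import Iterable, List, Optional, Sequence, Tuple
--
-- ADMIN_REPORT_TYPES = ['orders', 'customers', 'stores', 'products', 'revenue', 'users', 'year_end']
--
-- def _normalise_admin_types(raw: Iterable[str]) -> List[str]:
--     out: List[str] = []
--     for t in raw or []:
--         if not t:
--             continue
--         t = str(t).strip().lower()
--         if t == 'all':
--             return list(ADMIN_REPORT_TYPES)
--         if t in ADMIN_REPORT_TYPES and t not in out:
--             out.append(t)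
--     return out or list(ADMIN_REPORT_TYPES)
-- ===== SOURCE B (Python) =====
-- from typing import Iterable, List
--
-- ADMIN_REPORT_TYPES = ['orders', 'customers', 'stores', 'products', 'revenue', 'users', 'year_end']
--
-- def _normalise_admin_types(raw: Iterable[str]) -> List[str]:
--     # Normalise first; then, instead of scanning the input and deduplicating,
--     # iterate over the 7 allowed types, keep those that occur, and order them
--     # by first occurrence in the normalised input (index-then-sort).
--     norm = [str(t).strip().lower() for t in (raw or []) if t]
--     if 'all' in norm:
--         return list(ADMIN_REPORT_TYPES)
--     present = [t for t in ADMIN_REPORT_TYPES if t in norm]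
--     present.sort(key=norm.index)
--     return present or list(ADMIN_REPORT_TYPES)
-- ===== Notes on version B (the rewrite author's own statement) =====
-- stated objective: alternative
-- what changed: B never scans the input accumulating unique matches: it normalises once, then iterates over the 7-element allowed-types list to select those present and orders them by their first-occurrence index in the normalised input (index-then-sort), instead of A's single-pass loop with early return and 'not in out' dedup.
import Mathlib
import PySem

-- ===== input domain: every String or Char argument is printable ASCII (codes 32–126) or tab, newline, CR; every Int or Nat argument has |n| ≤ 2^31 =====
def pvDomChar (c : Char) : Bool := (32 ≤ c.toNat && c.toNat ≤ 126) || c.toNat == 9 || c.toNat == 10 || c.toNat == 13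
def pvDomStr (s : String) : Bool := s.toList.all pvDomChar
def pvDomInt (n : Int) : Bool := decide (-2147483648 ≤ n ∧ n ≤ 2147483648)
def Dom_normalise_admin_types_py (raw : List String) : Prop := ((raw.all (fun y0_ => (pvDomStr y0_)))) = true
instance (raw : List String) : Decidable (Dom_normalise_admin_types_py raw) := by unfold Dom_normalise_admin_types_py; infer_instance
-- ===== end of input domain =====

-- One line: B selects from the fixed allowed-types list and orders the hits by their
-- first-occurrence index in the normalised input (index-then-sort), instead of A's
-- single accumulating scan with early return — same return value, different algorithm.

-- ===== PORT A =====
def pvADMIN : List String :=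
  ["orders", "customers", "stores", "products", "revenue", "users", "year_end"]

-- A's loop: 'out' accumulator, early return on 'all', final 'out or list(ADMIN_REPORT_TYPES)'
def pvALoop : List String → List String → List String
  | out, [] => if out = [] then pvADMIN else out
  | out, t :: ts =>
    if t = "" then pvALoop out ts
    else
      let t' := PySem.Str.lower (PySem.Str.strip t)
      if t' = "all" then pvADMIN
      else if t' ∈ pvADMIN ∧ t' ∉ out then pvALoop (out ++ [t']) ts
      else pvALoop out ts

def normalise_admin_types_py (raw : List String) : List String :=
  pvALoop [] raw

-- ===== PORT B =====
def normalise_admin_types_py_alt (raw : List String) : List String :=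
  let norm := (raw.filter (fun t => !(t == ""))).map
    (fun t => PySem.Str.lower (PySem.Str.strip t))
  if "all" ∈ norm then pvADMIN
  else
    let present := pvADMIN.filter (fun t => decide (t ∈ norm))
    -- present.sort(key=norm.index): every member of present is in norm, so
    -- norm.index never raises; ported as index? with a never-used default.
    let res := PySem.List.sorted present
      (fun t => (PySem.List.index? norm t).getD 0) false
    if res = [] then pvADMIN else res

-- ===== PRECONDITION & SPEC =====
def Spec_normalise_admin_types_py (raw : List String) (out : List String) : Prop := out = normalise_admin_types_py_alt raw
instance (raw : List String) (out : List String) : Decidable (Spec_normalise_admin_types_py raw out) := by unfold Spec_normalise_admin_types_py; infer_instance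

-- ===== CLAIM (what is proved, stated in full; the proofs are below) =====
def Claim_equal_normalise_admin_types_py : Prop := ∀ (raw : List String), Dom_normalise_admin_types_py raw → Spec_normalise_admin_types_py raw (normalise_admin_types_py raw)

-- ===== LEMMAS AND PROOFS =====

def pvNorm (ts : List String) : List String :=
  (ts.filter (fun t => !(t == ""))).map (fun t => PySem.Str.lower (PySem.Str.strip t))

lemma pvNorm_cons (t : String) (ht : t ≠ "") (ts : List String) :
    pvNorm (t :: ts) = PySem.Str.lower (PySem.Str.strip t) :: pvNorm ts := by
  simp [pvNorm, ht]

-- A's loop computes: early 'all' return, else ordered dedup of the allowed items, else default.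
lemma pvALoop_eq (ts : List String) : ∀ (out : List String),
    pvALoop out ts =
      if "all" ∈ pvNorm ts then pvADMIN
      else
        let r := ((pvNorm ts).filter
          (fun x => decide (x ∈ pvADMIN))).foldl PySem.Set.add out
        if r = [] then pvADMIN else r := by
  induction ts with
  | nil => intro out; simp [pvALoop, pvNorm]
  | cons t ts ih =>
    intro out
    by_cases ht : t = ""
    · subst ht
      simpa [pvALoop, pvNorm] using ih out
    · rw [pvNorm_cons t ht ts]
      set t' := PySem.Str.lower (PySem.Str.strip t) with ht'
      by_cases hall : t' = "all"
      · simp [pvALoop, ht, ← ht', hall]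
      · have hall2 : ¬ ("all" = t') := fun h => hall h.symm
        by_cases hmem : t' ∈ pvADMIN
        · have hfil : (t' :: pvNorm ts).filter (fun x => decide (x ∈ pvADMIN))
              = t' :: (pvNorm ts).filter (fun x => decide (x ∈ pvADMIN)) := by
            simp [hmem]
          by_cases hout : t' ∉ out
          · have hstep : pvALoop out (t :: ts) = pvALoop (out ++ [t']) ts := by
              simp [pvALoop, ht, ← ht', hall, hmem, hout]
            have hadd : PySem.Set.add out t' = out ++ [t'] := by
              simp [PySem.Set.add]
              intro h; exact absurd h hout
            rw [hstep, ih (out ++ [t'])]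
            simp only [hall2, List.mem_cons, false_or, hfil, List.foldl_cons, hadd]
          · rw [Decidable.not_not] at hout
            have hstep : pvALoop out (t :: ts) = pvALoop out ts := by
              simp [pvALoop, ht, ← ht', hall, hout]
            have hadd : PySem.Set.add out t' = out := by
              simp [PySem.Set.add, hout]
            rw [hstep, ih out]
            simp only [hall2, List.mem_cons, false_or, hfil, List.foldl_cons, hadd]
        · have hfil : (t' :: pvNorm ts).filter (fun x => decide (x ∈ pvADMIN))
              = (pvNorm ts).filter (fun x => decide (x ∈ pvADMIN)) := by
            simp [hmem]
          have hstep : pvALoop out (t :: ts) = pvALoop out ts := by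
            simp [pvALoop, ht, ← ht', hall, hmem]
          rw [hstep, ih out]
          simp only [hall2, List.mem_cons, false_or, hfil]

-- foldl over Set.add with an accumulator = accumulator ++ the fresh part of the dedup
lemma pvFoldl_add_acc (r : List String) : ∀ (acc : List String),
    List.foldl PySem.Set.add acc r
      = acc ++ (List.foldl PySem.Set.add [] r).filter (fun z => !(acc.contains z)) := by
  induction r with
  | nil => intro acc; simp
  | cons y r ih =>
    intro acc
    have h0 : PySem.Set.add ([] : List String) y = [y] := by simp [PySem.Set.add]
    simp only [List.foldl_cons, h0]
    rw [ih (PySem.Set.add acc y), ih [y]]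
    by_cases hy : y ∈ acc
    · have hadd : PySem.Set.add acc y = acc := by simp [PySem.Set.add, hy]
      rw [hadd]
      congr 1
      rw [List.filter_append]
      have h1 : ([y] : List String).filter (fun z => !(acc.contains z)) = [] := by
        simp [hy]
      rw [h1, List.nil_append, List.filter_filter]
      apply List.filter_congr
      intro z hz
      by_cases hzy : z = y
      · subst hzy; simp [hy]
      · simp [hzy]
    · have hadd : PySem.Set.add acc y = acc ++ [y] := by
        simp [PySem.Set.add]; intro h; exact absurd h hy
      rw [hadd]
      rw [List.filter_append]
      have h1 : ([y] : List String).filter (fun z => !(acc.contains z)) = [y] := by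
        simp [hy]
      rw [h1, List.append_assoc]
      congr 2
      rw [List.filter_filter]
      apply List.filter_congr
      intro z hz
      by_cases hzy : z = y
      · subst hzy; simp
      · simp [hzy]

lemma pvDedup_cons (x : String) (r : List String) :
    PySem.List.dedup (x :: r)
      = x :: (PySem.List.dedup r).filter (fun z => !(z == x)) := by
  rw [PySem.List.dedup_eq_ofList, PySem.List.dedup_eq_ofList, PySem.Set.ofList_eq_foldl,
    PySem.Set.ofList_eq_foldl, List.foldl_cons]
  have h0 : PySem.Set.add ([] : List String) x = [x] := by simp [PySem.Set.add]
  rw [h0, pvFoldl_add_acc r [x]]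
  simp only [List.singleton_append, List.cons.injEq, true_and]
  apply List.filter_congr
  intro z hz
  by_cases h : z = x <;> simp [h]

-- dedup of a value-filter of l is strictly increasing in first-occurrence index in l
lemma pvPair (P : String → Bool) (l : List String) :
    (PySem.List.dedup (l.filter P)).Pairwise (fun a b => l.idxOf a < l.idxOf b) := by
  induction l with
  | nil => simp [PySem.List.dedup]
  | cons x t ih =>
    by_cases hP : P x
    · rw [List.filter_cons_of_pos hP, pvDedup_cons]
      constructor
      · intro b hb
        have hbne : b ≠ x := by
          have := (List.mem_filter.mp hb).2; simpa using this
        rw [List.idxOf_cons_self]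
        rw [List.idxOf_cons_ne _ (fun h => hbne h.symm)]
        omega
      · have := (ih.filter (fun z => !(z == x)))
        refine this.imp_of_mem ?_
        intro a b ha hb hab
        have hane : a ≠ x := by have := (List.mem_filter.mp ha).2; simpa using this
        have hbne : b ≠ x := by have := (List.mem_filter.mp hb).2; simpa using this
        rw [List.idxOf_cons_ne _ (fun h => hane h.symm), List.idxOf_cons_ne _ (fun h => hbne h.symm)]
        omega
    · rw [List.filter_cons_of_neg (by simpa using hP)]
      refine ih.imp_of_mem ?_
      intro a b ha hb hab
      have haP : P a := (List.mem_filter.mp ((PySem.List.mem_dedup _ _).mp ha)).2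
      have hbP : P b := (List.mem_filter.mp ((PySem.List.mem_dedup _ _).mp hb)).2
      have hane : a ≠ x := fun h => by subst h; simp [haP] at hP
      have hbne : b ≠ x := fun h => by subst h; simp [hbP] at hP
      rw [List.idxOf_cons_ne _ (fun h => hane h.symm), List.idxOf_cons_ne _ (fun h => hbne h.symm)]
      omega

-- list.index as a total key: on members it is idxOf
lemma pvIdx (a : String) (l : List String) (h : a ∈ l) :
    (PySem.List.index? l a).getD 0 = l.idxOf a := by
  rw [PySem.List.index?_eq_idxOf?]
  have hs : (List.idxOf? a l).isSome := by
    rw [List.isSome_idxOf?]; exact h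
  obtain ⟨k, hk⟩ := Option.isSome_iff_exists.mp hs
  rw [List.idxOf_eq_getD_idxOf?, hk]
  rfl

-- B's sort of the present allowed types by first-occurrence index = A's ordered dedup
lemma pvSorted_eq (norm : List String) :
    PySem.List.sorted (pvADMIN.filter (fun t => decide (t ∈ norm)))
      (fun t => (PySem.List.index? norm t).getD 0) false
    = PySem.List.dedup (norm.filter (fun x => decide (x ∈ pvADMIN))) := by
  apply PySem.List.sorted_eq_of_perm_of_pairwise_lt
  · apply (List.perm_ext_iff_of_nodup (PySem.List.nodup_dedup _) ?_).mpr
    · intro x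
      simp only [PySem.List.mem_dedup, List.mem_filter, decide_eq_true_eq]
      exact ⟨fun ⟨h1, h2⟩ => ⟨h2, h1⟩, fun ⟨h1, h2⟩ => ⟨h2, h1⟩⟩
    · exact (by decide : pvADMIN.Nodup).filter _
  · refine (pvPair _ norm).imp_of_mem ?_
    intro a b ha hb hab
    have haN : a ∈ norm := (List.mem_filter.mp ((PySem.List.mem_dedup _ _).mp ha)).1
    have hbN : b ∈ norm := (List.mem_filter.mp ((PySem.List.mem_dedup _ _).mp hb)).1
    rw [pvIdx a norm haN, pvIdx b norm hbN]
    exact hab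

lemma pvFoldl_eq_dedup (l : List String) :
    List.foldl PySem.Set.add [] l = PySem.List.dedup l := by
  rw [PySem.List.dedup_eq_ofList, PySem.Set.ofList_eq_foldl]

-- ===== VERDICT (by name: the statement is the Claim_ definition above) =====
theorem normalise_admin_types_py_spec : Claim_equal_normalise_admin_types_py := by
  intro raw _
  unfold Spec_normalise_admin_types_py normalise_admin_types_py normalise_admin_types_py_alt
  rw [pvALoop_eq raw []]
  simp only [pvNorm, pvFoldl_eq_dedup, pvSorted_eq]
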